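-- pv_equiv track=rewrite | github.com/isarandi/barecat | src/barecat/maintenance/rsync.py | _find_unescaped
-- ===== SOURCE A (Python) =====
-- def _find_unescaped(s: str, needle: str) -> int:
--     """Find first occurrence of needle not preceded by odd number of backslashes.
--
--     Returns index or -1 if not found.
--     """
--     i = 0
--     while i < len(s):
--         idx = s.find(needle, i)
--         if idx == -1:
--             return -1
--         # Count preceding backslashes
--         num_backslashes = 0
--         j = idx - 1
--         while j >= 0 and s[j] == '\\':
--             num_backslashes += 1
--             j -= 1
--         # If even number of backslashes, this is unescaped
--         if num_backslashes % 2 == 0: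
--             return idx
--         i = idx + 1
--     return -1
-- ===== SOURCE B (Python) =====
-- def _find_unescaped(s: str, needle: str) -> int:
--     """Single left-to-right scan keeping the length of the current backslash run."""
--     bs = 0
--     for i in range(len(s)):
--         if s.startswith(needle, i) and bs % 2 == 0:
--             return i
--         bs = bs + 1 if s[i] == '\\' else 0
--     return -1
-- ===== Notes on version B (the rewrite author's own statement) =====
-- stated objective: simpler
-- what changed: Replaced the restart-on-escaped-match loop (str.find plus a backward backslash-counting inner loop at each candidate) by a single forward scan that tests startswith at every index while maintaining the length of the current backslash run.
import Mathlib
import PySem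

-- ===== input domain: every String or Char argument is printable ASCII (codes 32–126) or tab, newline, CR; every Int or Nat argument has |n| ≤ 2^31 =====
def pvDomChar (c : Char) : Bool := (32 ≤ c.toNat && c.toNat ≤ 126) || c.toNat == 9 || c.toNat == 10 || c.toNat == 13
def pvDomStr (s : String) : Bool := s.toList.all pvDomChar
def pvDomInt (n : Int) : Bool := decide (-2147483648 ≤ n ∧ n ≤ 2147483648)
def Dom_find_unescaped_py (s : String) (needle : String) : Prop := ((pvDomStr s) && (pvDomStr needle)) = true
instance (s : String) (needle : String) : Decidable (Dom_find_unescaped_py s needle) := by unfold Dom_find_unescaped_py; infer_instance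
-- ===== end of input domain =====

-- B replaces A's find-then-backscan restart loop by one forward scan with a backslash-run counter (objective: simpler).

-- ===== PORT A =====
-- Python's backward inner loop `j = idx-1; while j >= 0 and s[j] == '\\': num += 1; j -= 1`,
-- as a recursion on j+1 (so 0 means "j reached -1"); exact for 0 ≤ j1 ≤ len s.
def pvCountBack (s : List Char) : Nat → Nat
  | 0 => 0
  | j + 1 => if s.getD j ' ' == '\\' then pvCountBack s j + 1 else 0

def pvLoopA (s needle : List Char) (i : Nat) : Int :=
  if hi : i < s.length then
    let idx := PySem.Chars.findFrom s needle (i : Int) none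
    if hidx : idx = -1 then -1
    else
      let num := pvCountBack s idx.toNat
      if num % 2 = 0 then idx
      else pvLoopA s needle (idx.toNat + 1)
  else -1
termination_by s.length - i
decreasing_by
  have h := PySem.Chars.findFrom_natCast_spec s needle i (Nat.le_of_lt hi) hidx
  omega

def find_unescaped_py (s : String) (needle : String) : Int :=
  pvLoopA s.toList needle.toList 0

-- ===== PORT B =====
def pvLoopB (s needle : List Char) (i bs : Nat) : Int :=
  if i < s.length then
    if PySem.Chars.startswith (s.drop i) needle && bs % 2 == 0 then (i : Int)
    else pvLoopB s needle (i + 1) (if s.getD i ' ' == '\\' then bs + 1 else 0)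
  else -1
termination_by s.length - i

def find_unescaped_py_alt (s : String) (needle : String) : Int :=
  pvLoopB s.toList needle.toList 0 0

-- ===== PRECONDITION & SPEC =====
def Spec_find_unescaped_py (s : String) (needle : String) (out : Int) : Prop := out = find_unescaped_py_alt s needle
instance (s : String) (needle : String) (out : Int) : Decidable (Spec_find_unescaped_py s needle out) := by unfold Spec_find_unescaped_py; infer_instance

-- ===== CLAIM (what is proved, stated in full; the proofs are below) =====
def Claim_equal_find_unescaped_py : Prop := ∀ (s : String) (needle : String), Dom_find_unescaped_py s needle → Spec_find_unescaped_py s needle (find_unescaped_py s needle)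

-- ===== LEMMAS AND PROOFS =====

-- Common reference: the first index i < len s where needle matches and the
-- preceding backslash run is even; -1 if none.
def pvFirstGood (s needle : List Char) (i : Nat) : Int :=
  if i < s.length then
    if needle.isPrefixOf (s.drop i) && pvCountBack s i % 2 == 0 then (i : Int)
    else pvFirstGood s needle (i + 1)
  else -1
termination_by s.length - i

theorem pvLoopB_firstGood (s needle : List Char) (i : Nat) :
    pvLoopB s needle i (pvCountBack s i) = pvFirstGood s needle i := by
  rw [pvLoopB, pvFirstGood]
  by_cases hi : i < s.length
  · simp only [hi, if_true]
    have hsw : PySem.Chars.startswith (s.drop i) needle = needle.isPrefixOf (s.drop i) := by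
      rw [Bool.eq_iff_iff]
      rw [PySem.Chars.startswith_iff, List.isPrefixOf_iff_prefix]
    rw [hsw]
    by_cases hc : (needle.isPrefixOf (s.drop i) && pvCountBack s i % 2 == 0) = true
    · rw [if_pos hc, if_pos hc]
    · rw [if_neg hc, if_neg hc]
      have : (if s.getD i ' ' == '\\' then pvCountBack s i + 1 else 0) = pvCountBack s (i + 1) := by
        simp [pvCountBack]
      rw [this]
      exact pvLoopB_firstGood s needle (i + 1)
  · simp [hi]
termination_by s.length - i

-- A match of needle at position j ≥ i makes needle an infix of s.drop i.
theorem pv_prefix_drop_infix (s needle : List Char) (i j : Nat) (hij : i ≤ j)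
    (h : needle <+: s.drop j) : needle <:+: s.drop i := by
  have : s.drop j = (s.drop i).drop (j - i) := by
    rw [List.drop_drop]; congr 1; omega
  rw [this] at h
  obtain ⟨x, hx⟩ := h
  obtain ⟨y, hy⟩ := List.drop_suffix (j - i) (s.drop i)
  exact ⟨y, x, by rw [← hy, ← hx]; simp⟩

-- If no match occurs at any index in [i, m), pvFirstGood is unchanged from i to m.
theorem pvFirstGood_skip (s needle : List Char) (i m : Nat) (him : i ≤ m)
    (h : ∀ j, i ≤ j → j < m → ¬ needle <+: s.drop j) :
    pvFirstGood s needle i = pvFirstGood s needle m := by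
  rcases Nat.lt_or_ge i m with hlt | hge
  · by_cases hi : i < s.length
    · rw [pvFirstGood]
      have hnp : ¬ needle <+: s.drop i := h i le_rfl hlt
      have : needle.isPrefixOf (s.drop i) = false := by
        cases hb : needle.isPrefixOf (s.drop i)
        · rfl
        · exact absurd (List.isPrefixOf_iff_prefix.mp hb) hnp
      simp only [hi, if_true, this, Bool.false_and]
      exact pvFirstGood_skip s needle (i + 1) m hlt (fun j hj hjm => h j (by omega) hjm)
    · have hm : ¬ m < s.length := by omega
      rw [pvFirstGood]
      simp only [hi, if_false]
      rw [pvFirstGood]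
      simp [hm]
  · have : i = m := by omega
    rw [this]
termination_by m - i

theorem pvLoopA_firstGood (s needle : List Char) (i : Nat) :
    pvLoopA s needle i = pvFirstGood s needle i := by
  rw [pvLoopA]
  by_cases hi : i < s.length
  · simp only [hi, dif_pos]
    by_cases hidx : PySem.Chars.findFrom s needle (i : Int) none = -1
    · simp only [hidx, dif_pos]
      -- no match at any j ≥ i, so pvFirstGood runs to -1
      have hno : ¬ needle <:+: s.drop i :=
        (PySem.Chars.findFrom_natCast_eq_neg_one_iff s needle i (Nat.le_of_lt hi)).mp hidx
      have h := pvFirstGood_skip s needle i s.length (Nat.le_of_lt hi)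
        (fun j hj _ hp => hno (pv_prefix_drop_infix s needle i j hj hp))
      rw [h, pvFirstGood]
      simp
    · simp only [hidx, dif_neg, not_false_iff]
      obtain ⟨hle, hpre, hfirst⟩ :=
        PySem.Chars.findFrom_natCast_spec s needle i (Nat.le_of_lt hi) hidx
      set f := PySem.Chars.findFrom s needle (i : Int) none with hf
      have hfnat : (f.toNat : Int) = f := Int.toNat_of_nonneg (by omega)
      have hskip : pvFirstGood s needle i = pvFirstGood s needle f.toNat :=
        pvFirstGood_skip s needle i f.toNat (by omega)
          (fun j hj hjm => hfirst j hj hjm)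
      rw [hskip]
      have hflt : f.toNat < s.length := by
        rcases List.eq_nil_or_concat needle with hne | ⟨ys, y, hys⟩
        · -- empty needle: findFrom returns i itself
          subst hne
          have : f = (i : Int) := by
            rw [hf, PySem.Chars.findFrom_natCast s [] i (Nat.le_of_lt hi)]
            simp [PySem.Chars.find_nil]
          omega
        · -- nonempty needle is a prefix of s.drop f.toNat, so that drop is nonempty
          have hne : needle ≠ [] := by subst hys; simp
          have : s.drop f.toNat ≠ [] := by
            intro hnil
            rw [hnil, List.prefix_nil] at hpre
            exact hne hpre
          have := List.length_drop (l := s) (i := f.toNat)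
          by_contra hge
          have : s.drop f.toNat = [] := List.drop_eq_nil_of_le (by omega)
          simp_all
      rw [pvFirstGood]
      have hpf : needle.isPrefixOf (s.drop f.toNat) = true := by
        simp [List.isPrefixOf_iff_prefix, hpre]
      by_cases hpar : pvCountBack s f.toNat % 2 = 0
      · simp [hflt, hpf, hpar, hfnat]
      · have : (pvCountBack s f.toNat % 2 == 0) = false := by
          simp [hpar]
        simp only [hflt, if_true, hpf, this, Bool.and_false, if_false, hpar]
        exact pvLoopA_firstGood s needle (f.toNat + 1)
  · rw [pvFirstGood]; simp [hi]
termination_by s.length - i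
decreasing_by omega

-- ===== VERDICT (by name: the statement is the Claim_ definition above) =====
theorem find_unescaped_py_spec : Claim_equal_find_unescaped_py := by
  intro s needle _
  unfold Spec_find_unescaped_py find_unescaped_py find_unescaped_py_alt
  have hb : pvLoopB s.toList needle.toList 0 0 = pvFirstGood s.toList needle.toList 0 := by
    have : (0 : Nat) = pvCountBack s.toList 0 := by simp [pvCountBack]
    rw [this]; exact pvLoopB_firstGood _ _ _
  rw [pvLoopA_firstGood, hb]
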